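-- pv_equiv track=rewrite | github.com/Bmcunningham4/YT_channel-study_playlists | Music_functions/music_functions2.py | mp3_names
-- ===== SOURCE A (Python) =====
-- def string_to_list(input_string):
--     elements = input_string.split(', ')
--     return elements
--
-- def mp3_names(stringy):
--     list_1 = string_to_list(stringy)
--     new_list = []
--     for string in list_1:
--         new_string = string + ".mp3"
--         new_list.append(new_string)
--     final_string = ' '.join(new_list)
--     return final_string
-- ===== SOURCE B (Python) =====
-- def mp3_names(stringy):
--     return stringy.replace(', ', '.mp3 ') + '.mp3'
-- ===== Notes on version B (the rewrite author's own statement) =====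
-- stated objective: simpler
-- what changed: Replaces the split/loop/append/join pipeline with a single str.replace of every separator ', ' by '.mp3 ' plus one trailing '.mp3', so no intermediate list or explicit loop exists.
import Mathlib
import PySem

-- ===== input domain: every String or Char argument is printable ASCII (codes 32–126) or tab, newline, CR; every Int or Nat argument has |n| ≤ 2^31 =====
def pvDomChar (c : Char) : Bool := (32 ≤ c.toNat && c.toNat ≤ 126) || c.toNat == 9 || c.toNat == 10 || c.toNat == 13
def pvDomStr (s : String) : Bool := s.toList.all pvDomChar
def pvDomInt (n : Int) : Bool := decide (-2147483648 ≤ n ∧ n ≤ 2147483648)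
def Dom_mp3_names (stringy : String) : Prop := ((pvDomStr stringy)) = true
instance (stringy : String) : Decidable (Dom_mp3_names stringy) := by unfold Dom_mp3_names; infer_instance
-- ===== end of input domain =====

-- B replaces A's split/loop/join pipeline with one string substitution plus a final suffix (objective: simpler).

-- ===== PORT A =====
-- helper: string_to_list(input_string) = input_string.split(', ')  (sep is the nonempty literal ", ", so split? is some)
def string_to_list (input_string : String) : List String :=
  (PySem.Str.split? input_string ", ").getD []

def mp3_names (stringy : String) : String :=
  let list_1 := string_to_list stringy
  let new_list := list_1.foldl (fun acc string => acc ++ [string ++ ".mp3"]) []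
  let final_string := PySem.Str.join " " new_list
  final_string

-- ===== PORT B =====
def mp3_names_alt (stringy : String) : String :=
  PySem.Str.replace stringy ", " ".mp3 " ++ ".mp3"

-- ===== PRECONDITION & SPEC =====
def Spec_mp3_names (stringy : String) (out : String) : Prop := out = mp3_names_alt stringy
instance (stringy : String) (out : String) : Decidable (Spec_mp3_names stringy out) := by unfold Spec_mp3_names; infer_instance

-- ===== CLAIM (what is proved, stated in full; the proofs are below) =====
def Claim_equal_mp3_names : Prop := ∀ (stringy : String), Dom_mp3_names stringy → Spec_mp3_names stringy (mp3_names stringy)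

-- ===== LEMMAS AND PROOFS =====

-- simple recursive characterisation of splitting on ", "
def pvTok : List Char → List (List Char)
  | [] => [[]]
  | c :: t =>
    if [',', ' '].isPrefixOf (c :: t) then [] :: pvTok (List.drop 2 (c :: t))
    else (pvTok t).modifyHead (c :: ·)
termination_by l => l.length
decreasing_by all_goals (simp only [List.length_drop, List.length_cons]; omega)

-- simple recursive characterisation of replacing ", " by ".mp3 "
def pvRep : List Char → List Char
  | [] => []
  | c :: t =>
    if [',', ' '].isPrefixOf (c :: t) then ['.', 'm', 'p', '3', ' '] ++ pvRep (List.drop 2 (c :: t))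
    else c :: pvRep t
termination_by l => l.length
decreasing_by all_goals (simp only [List.length_drop, List.length_cons]; omega)

theorem pvTok_ne_nil (l : List Char) : pvTok l ≠ [] := by
  induction l using pvTok.induct with
  | case1 => simp [pvTok]
  | case2 c t hpre ih => rw [pvTok, if_pos hpre]; simp
  | case3 c t hpre ih =>
    rw [pvTok, if_neg hpre]
    rcases hx : pvTok t with _ | ⟨x, xs⟩
    · exact absurd hx ih
    · simp

theorem pvLen2 : ([',', ' '] : List Char).length = 2 := rfl

theorem go_split (fuel : Nat) (l cur : List Char) (acc : List (List Char)) (h : l.length ≤ fuel) :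
    PySem.Chars.splitOn.go [',', ' '] fuel l cur acc
      = acc.reverse ++ (pvTok l).modifyHead (cur.reverse ++ ·) := by
  induction fuel generalizing l cur acc with
  | zero =>
    have hl : l = [] := by cases l <;> simp_all
    subst hl
    simp [PySem.Chars.splitOn.go, pvTok]
  | succ fuel ih =>
    cases l with
    | nil => simp [PySem.Chars.splitOn.go, pvTok]
    | cons c t =>
      rw [PySem.Chars.splitOn.go, pvTok]
      split
      · rename_i hpre
        rw [pvLen2,
          ih (List.drop 2 (c :: t)) [] (cur.reverse :: acc)
            (by simp only [List.length_drop, List.length_cons] at h ⊢; omega)]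
        rcases hx : pvTok (List.drop 2 (c :: t)) with _ | ⟨x, xs⟩
        · exact absurd hx (pvTok_ne_nil _)
        · simp
      · rename_i hpre
        rw [ih t (c :: cur) acc (by simp only [List.length_cons] at h; omega)]
        rcases hx : pvTok t with _ | ⟨x, xs⟩
        · exact absurd hx (pvTok_ne_nil _)
        · simp

theorem go_rep (fuel : Nat) (l acc : List Char) (h : l.length ≤ fuel) :
    PySem.Chars.replace.go [',', ' '] ['.', 'm', 'p', '3', ' '] fuel l acc
      = acc.reverse ++ pvRep l := by
  induction fuel generalizing l acc with
  | zero =>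
    have hl : l = [] := by cases l <;> simp_all
    subst hl
    simp [PySem.Chars.replace.go, pvRep]
  | succ fuel ih =>
    cases l with
    | nil => simp [PySem.Chars.replace.go, pvRep]
    | cons c t =>
      rw [PySem.Chars.replace.go, pvRep]
      split
      · rw [pvLen2,
          ih (List.drop 2 (c :: t)) _
            (by simp only [List.length_drop, List.length_cons] at h ⊢; omega)]
        simp
      · rw [ih t _ (by simp only [List.length_cons] at h; omega)]
        simp

theorem pv_join_head_cons (c : Char) (a : List Char) (rest : List (List Char)) :
    PySem.Chars.join [' '] ((c :: a) :: rest) = c :: PySem.Chars.join [' '] (a :: rest) := by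
  cases rest with
  | nil => simp [PySem.Chars.join_singleton]
  | cons b bs => rw [PySem.Chars.join_cons_cons, PySem.Chars.join_cons_cons]; simp

theorem main_chars (l : List Char) :
    PySem.Chars.join [' '] ((pvTok l).map (· ++ ['.', 'm', 'p', '3']))
      = pvRep l ++ ['.', 'm', 'p', '3'] := by
  induction l using pvTok.induct with
  | case1 => simp [pvTok, pvRep, PySem.Chars.join_singleton]
  | case2 c t hpre ih =>
    rw [pvTok, pvRep, if_pos hpre, if_pos hpre]
    rcases hx : pvTok (List.drop 2 (c :: t)) with _ | ⟨x, xs⟩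
    · exact absurd hx (pvTok_ne_nil _)
    · rw [hx] at ih
      simp only [List.map_cons] at ih
      rw [List.map_cons, List.map_cons, PySem.Chars.join_cons_cons, ih]
      simp
  | case3 c t hpre ih =>
    rw [pvTok, pvRep, if_neg hpre, if_neg hpre]
    rcases hx : pvTok t with _ | ⟨x, xs⟩
    · exact absurd hx (pvTok_ne_nil _)
    · rw [hx] at ih
      simp only [List.map_cons] at ih
      rw [List.modifyHead_cons, List.map_cons, List.cons_append, pv_join_head_cons, ih,
        List.cons_append]

theorem foldl_append_map (l : List String) (acc : List String) :
    l.foldl (fun acc string => acc ++ [string ++ ".mp3"]) acc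
      = acc ++ l.map (· ++ ".mp3") := by
  induction l generalizing acc with
  | nil => simp
  | cons x xs ih => simp [List.foldl_cons, ih]

-- ===== VERDICT (by name: the statement is the Claim_ definition above) =====
theorem mp3_names_spec : Claim_equal_mp3_names := by
  intro stringy _
  unfold Spec_mp3_names mp3_names mp3_names_alt string_to_list
  apply String.toList_injective
  have hsep : (", " : String).toList = [',', ' '] := by decide
  have hm : (".mp3" : String).toList = ['.', 'm', 'p', '3'] := by decide
  have hnew : (".mp3 " : String).toList = ['.', 'm', 'p', '3', ' '] := by decide
  have hsplit : PySem.Chars.splitOn stringy.toList [',', ' '] = pvTok stringy.toList := by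
    rw [PySem.Chars.splitOn, go_split _ _ _ _ (by omega)]
    rcases hx : pvTok stringy.toList with _ | ⟨x, xs⟩
    · exact absurd hx (pvTok_ne_nil _)
    · simp
  have hrep : PySem.Chars.replace stringy.toList [',', ' '] ['.', 'm', 'p', '3', ' ']
      = pvRep stringy.toList := by
    rw [PySem.Chars.replace]
    simp only [List.isEmpty_cons, if_false, Bool.false_eq_true]
    exact go_rep _ _ _ (by omega)
  simp only [PySem.Str.split?, PySem.Chars.split?, hsep, List.isEmpty_cons, Bool.false_eq_true,
    if_false, Option.map_some, Option.getD_some, foldl_append_map, List.nil_append,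
    PySem.Str.join, PySem.Str.replace, hnew, String.toList_append, String.toList_ofList,
    hsplit, hrep, hm, List.map_map]
  have hmaps : (List.map String.toList (List.map (fun s => s ++ ".mp3")
      (List.map String.ofList (pvTok stringy.toList))))
      = (pvTok stringy.toList).map (· ++ ['.', 'm', 'p', '3']) := by
    simp [List.map_map, Function.comp, String.toList_append, String.toList_ofList, hm]
  rw [show (" " : String).toList = [' '] from by decide]
  rw [← main_chars stringy.toList, ← hmaps]
  simp [List.map_map]
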